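-- pv_equiv track=rewrite | github.com/SCAI-JHU/MindZero | mods/construction/gen_data/generate_gw_layouts.py | _is_connected
-- ===== SOURCE A (Python) =====
-- from collections import deque
--
-- def _is_connected(width, height, blocked):
--     free_cells = [(x, y) for x in range(width) for y in range(height) if (x, y) not in blocked]
--     if not free_cells:
--         return False
--     start = free_cells[0]
--     visited = {start}
--     queue = deque([start])
--     while queue:
--         x, y = queue.popleft()
--         for dx, dy in [(0, 1), (0, -1), (-1, 0), (1, 0)]:
--             nx, ny = x + dx, y + dy
--             nxt = (nx, ny)
--             if 0 <= nx < width and 0 <= ny < height and nxt not in blocked and nxt not in visited: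
--                 visited.add(nxt)
--                 queue.append(nxt)
--     return len(visited) == len(free_cells)
-- ===== SOURCE B (Python) =====
-- def _is_connected(width, height, blocked):
--     free_cells = [(x, y) for x in range(width) for y in range(height) if (x, y) not in blocked]
--     if not free_cells:
--         return False
--     region = {free_cells[0]}
--     rest = free_cells[1:]
--     changed = True
--     while changed:
--         changed = False
--         remaining = []
--         for (x, y) in rest:
--             if (x + 1, y) in region or (x - 1, y) in region \
--                     or (x, y + 1) in region or (x, y - 1) in region:
--                 region.add((x, y))
--                 changed = True
--             else:
--                 remaining.append((x, y))
--         rest = remaining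
--     return not rest
-- ===== Notes on version B (the rewrite author's own statement) =====
-- stated objective: alternative
-- what changed: Replaces A's BFS (deque frontier, popping a cell and probing its four neighbours) by fixed-point saturation: repeated sweeps over the not-yet-absorbed free cells, absorbing any cell adjacent to the growing region until a sweep absorbs nothing; connected iff every free cell was absorbed.
import Mathlib
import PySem

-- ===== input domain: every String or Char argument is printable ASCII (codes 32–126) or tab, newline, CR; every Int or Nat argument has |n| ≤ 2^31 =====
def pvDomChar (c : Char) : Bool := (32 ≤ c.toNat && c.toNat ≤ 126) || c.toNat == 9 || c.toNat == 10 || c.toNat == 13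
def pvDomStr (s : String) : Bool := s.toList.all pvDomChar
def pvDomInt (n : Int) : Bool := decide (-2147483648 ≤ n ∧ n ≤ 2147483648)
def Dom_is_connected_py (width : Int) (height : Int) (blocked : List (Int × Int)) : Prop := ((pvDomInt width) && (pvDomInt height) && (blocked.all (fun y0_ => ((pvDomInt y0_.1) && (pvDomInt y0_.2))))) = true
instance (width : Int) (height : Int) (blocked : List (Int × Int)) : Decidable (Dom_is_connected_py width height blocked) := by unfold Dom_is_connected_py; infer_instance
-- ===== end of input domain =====

-- B replaces A's BFS (deque frontier) by fixed-point saturation sweeps over the free cells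
-- (no speed claim; an alternative algorithm of similar cost).

-- ===== PORT A =====
-- the comprehension [(x, y) for x in range(width) for y in range(height) if (x, y) not in blocked],
-- textually identical in A and in B, shared by both ports
def pvFree (width height : Int) (blocked : List (Int × Int)) : List (Int × Int) :=
  (PySem.List.pyRange 0 width 1).flatMap (fun x =>
    ((PySem.List.pyRange 0 height 1).filter (fun y => !(blocked.contains (x, y)))).map
      (fun y => (x, y)))

-- the body of A's inner `for dx, dy in [...]` loop
def pvBfsStep (width height : Int) (blocked : List (Int × Int)) (x y : Int)
    (st : List (Int × Int) × List (Int × Int)) (d : Int × Int) :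
    List (Int × Int) × List (Int × Int) :=
  let nxt := (x + d.1, y + d.2)
  if 0 ≤ nxt.1 ∧ nxt.1 < width ∧ 0 ≤ nxt.2 ∧ nxt.2 < height ∧
      nxt ∉ blocked ∧ nxt ∉ st.1 then
    (nxt :: st.1, st.2 ++ [nxt])
  else st

-- A's BFS while-loop; `visited` is the Python set (distinct list), `queue` the deque.
-- The fuel only makes the recursion structural; it is proved sufficient below.
def pvBfsLoop (width height : Int) (blocked : List (Int × Int)) :
    Nat → List (Int × Int) → List (Int × Int) → List (Int × Int)
  | 0, visited, _ => visited
  | _ + 1, visited, [] => visited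
  | fuel + 1, visited, (x, y) :: qs =>
      let st := [((0 : Int), (1 : Int)), (0, -1), (-1, 0), (1, 0)].foldl
        (pvBfsStep width height blocked x y) (visited, qs)
      pvBfsLoop width height blocked fuel st.1 st.2

def is_connected_py (width : Int) (height : Int) (blocked : List (Int × Int)) : Bool :=
  match pvFree width height blocked with
  | [] => false
  | s :: rest =>
      let free := s :: rest
      let visited := pvBfsLoop width height blocked (free.length + 1) [s] [s]
      visited.length == free.length

-- ===== PORT B =====
-- the body of B's inner `for (x, y) in rest` loop; state = (region, remaining, changed)
def pvPassStep (st : List (Int × Int) × List (Int × Int) × Bool) (c : Int × Int) :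
    List (Int × Int) × List (Int × Int) × Bool :=
  if (c.1 + 1, c.2) ∈ st.1 ∨ (c.1 - 1, c.2) ∈ st.1 ∨
      (c.1, c.2 + 1) ∈ st.1 ∨ (c.1, c.2 - 1) ∈ st.1 then
    (c :: st.1, st.2.1, true)
  else (st.1, st.2.1 ++ [c], st.2.2)

-- one sweep of B's while-loop over `rest`
def pvPass (region rest : List (Int × Int)) :
    List (Int × Int) × List (Int × Int) × Bool :=
  rest.foldl pvPassStep (region, [], false)

-- B's while-changed loop; fuel only makes the recursion structural (every sweep that
-- changes something strictly shrinks `rest`), proved sufficient below.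
def pvGrow : Nat → List (Int × Int) → List (Int × Int) → List (Int × Int) × List (Int × Int)
  | 0, region, rest => (region, rest)
  | fuel + 1, region, rest =>
      let st := pvPass region rest
      if st.2.2 then pvGrow fuel st.1 st.2.1 else (st.1, st.2.1)

def is_connected_py_alt (width : Int) (height : Int) (blocked : List (Int × Int)) : Bool :=
  match pvFree width height blocked with
  | [] => false
  | s :: rest =>
      let st := pvGrow (rest.length + 1) [s] rest
      st.2.isEmpty

-- ===== PRECONDITION & SPEC =====
def Spec_is_connected_py (width : Int) (height : Int) (blocked : List (Int × Int)) (out : Bool) : Prop := out = is_connected_py_alt width height blocked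
instance (width : Int) (height : Int) (blocked : List (Int × Int)) (out : Bool) : Decidable (Spec_is_connected_py width height blocked out) := by unfold Spec_is_connected_py; infer_instance

-- ===== CLAIM (what is proved, stated in full; the proofs are below) =====
def Claim_equal_is_connected_py : Prop := ∀ (width : Int) (height : Int) (blocked : List (Int × Int)), Dom_is_connected_py width height blocked → Spec_is_connected_py width height blocked (is_connected_py width height blocked)

-- ===== LEMMAS AND PROOFS =====

-- a cell that is in bounds and not blocked
def pvInFree (w h : Int) (b : List (Int × Int)) (c : Int × Int) : Prop :=
  0 ≤ c.1 ∧ c.1 < w ∧ 0 ≤ c.2 ∧ c.2 < h ∧ c ∉ b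

-- 4-neighbour adjacency
def pvAdj (a c : Int × Int) : Prop :=
  c = (a.1, a.2 + 1) ∨ c = (a.1, a.2 - 1) ∨ c = (a.1 - 1, a.2) ∨ c = (a.1 + 1, a.2)

-- reachability from s through free cells
def pvReach (w h : Int) (b : List (Int × Int)) (s c : Int × Int) : Prop :=
  Relation.ReflTransGen (fun u v => pvInFree w h b v ∧ pvAdj u v) s c

lemma mem_pvFree {w h : Int} {b : List (Int × Int)} {c : Int × Int} :
    c ∈ pvFree w h b ↔ pvInFree w h b c := by
  obtain ⟨cx, cy⟩ := c
  simp only [pvFree, List.mem_flatMap, List.mem_map, List.mem_filter,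
    PySem.List.mem_pyRange_one, pvInFree, Bool.not_eq_eq_eq_not, Bool.not_true,
    List.contains_eq_mem, decide_eq_false_iff_not, Prod.mk.injEq]
  constructor
  · rintro ⟨x, hx, y, ⟨hy, hb⟩, rfl, rfl⟩
    exact ⟨hx.1, hx.2, hy.1, hy.2, hb⟩
  · rintro ⟨h1, h2, h3, h4, h5⟩
    exact ⟨cx, ⟨h1, h2⟩, cy, ⟨⟨h3, h4⟩, h5⟩, rfl, rfl⟩

lemma pv_nodup_flatMap {α β : Type} [DecidableEq β] (l : List α) (f : α → List β)
    (hl : l.Nodup) (hf : ∀ x ∈ l, (f x).Nodup)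
    (hd : ∀ x ∈ l, ∀ y ∈ l, x ≠ y → ∀ c ∈ f x, c ∉ f y) : (l.flatMap f).Nodup := by
  induction l with
  | nil => simp
  | cons a t ih =>
      rw [List.flatMap_cons, List.nodup_append]
      refine ⟨hf a (by simp), ?_, ?_⟩
      · exact ih hl.of_cons (fun x hx => hf x (by simp [hx]))
          (fun x hx y hy => hd x (by simp [hx]) y (by simp [hy]))
      · intro c hc c' hc' heq
        subst heq
        obtain ⟨x, hx, hcx⟩ := List.mem_flatMap.1 hc'
        have hax : a ≠ x := by rintro rfl; exact (List.nodup_cons.1 hl).1 hx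
        exact hd a (by simp) x (by simp [hx]) hax c hc hcx

lemma nodup_pvFree (w h : Int) (b : List (Int × Int)) : (pvFree w h b).Nodup := by
  refine pv_nodup_flatMap _ _ (PySem.List.nodup_pyRange_one _ _) ?_ ?_
  · intro x _
    exact (List.Nodup.filter _ (PySem.List.nodup_pyRange_one _ _)).map
      (fun y₁ y₂ hyy => by simpa using hyy)
  · intro x _ x' _ hxx c hc hc'
    simp only [List.mem_map, List.mem_filter] at hc hc'
    obtain ⟨_, _, rfl⟩ := hc
    obtain ⟨_, _, heq⟩ := hc'
    exact hxx (by simpa using (congrArg Prod.fst heq).symm)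

lemma pvReach_inFree {w h : Int} {b : List (Int × Int)} {s c : Int × Int}
    (hs : pvInFree w h b s) (hr : pvReach w h b s c) : pvInFree w h b c := by
  induction hr with
  | refl => exact hs
  | tail _ h2 _ => exact h2.1

lemma pvAdj_symm {a c : Int × Int} (h : pvAdj a c) : pvAdj c a := by
  obtain ⟨ax, ay⟩ := a; obtain ⟨cx, cy⟩ := c
  simp only [pvAdj, Prod.mk.injEq] at h ⊢
  omega

-- invariant of A's BFS loop
def pvBfsInv (w h : Int) (b : List (Int × Int)) (s : Int × Int)
    (V Q : List (Int × Int)) : Prop :=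
  V.Nodup ∧ s ∈ V ∧ (∀ c ∈ V, pvInFree w h b c ∧ pvReach w h b s c) ∧
  (∀ c ∈ Q, c ∈ V) ∧
  (∀ v ∈ V, v ∉ Q → ∀ n, pvInFree w h b n → pvAdj v n → n ∈ V)

lemma pv_nodup_subset_length {α : Type} [DecidableEq α] {l1 l2 : List α}
    (h1 : l1.Nodup) (hsub : ∀ c ∈ l1, c ∈ l2) : l1.length ≤ l2.length := by
  calc l1.length = l1.toFinset.card := (List.toFinset_card_of_nodup h1).symm
    _ ≤ l2.toFinset.card := Finset.card_le_card (by
        intro a ha; rw [List.mem_toFinset] at *; exact hsub a ha)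
    _ ≤ l2.length := l2.toFinset_card_le

-- what one pass of the inner for-loop over the four directions does
lemma pvBfs_fold (w h : Int) (b : List (Int × Int)) (s : Int × Int) (x y : Int)
    (hr : pvReach w h b s (x, y)) :
    ∀ (ds V Q : List (Int × Int)) (st : List (Int × Int) × List (Int × Int)),
      st = List.foldl (pvBfsStep w h b x y) (V, Q) ds →
      (∀ d ∈ ds, pvAdj (x, y) (x + d.1, y + d.2)) →
      V.Nodup → (∀ c ∈ V, pvInFree w h b c ∧ pvReach w h b s c) →
      st.1.Nodup ∧
      (∀ c ∈ V, c ∈ st.1) ∧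
      (∀ c ∈ st.1, pvInFree w h b c ∧ pvReach w h b s c) ∧
      (∀ c, c ∈ st.2 ↔ (c ∈ Q ∨ (c ∈ st.1 ∧ c ∉ V))) ∧
      (st.1.length + Q.length = V.length + st.2.length) ∧
      (∀ d ∈ ds, pvInFree w h b (x + d.1, y + d.2) → (x + d.1, y + d.2) ∈ st.1) := by
  intro ds
  induction ds with
  | nil =>
      intro V Q st hst _ hV hgood
      rw [List.foldl_nil] at hst
      subst hst
      refine ⟨hV, fun c hc => hc, hgood, fun c => ?_, by simp, by simp⟩
      constructor
      · exact fun hc => Or.inl hc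
      · rintro (hc | ⟨hc1, hc2⟩)
        · exact hc
        · exact absurd hc1 hc2
  | cons d ds ih =>
      intro V Q st hst hds hV hgood
      rw [List.foldl_cons] at hst
      have hadj : pvAdj (x, y) (x + d.1, y + d.2) := hds d (by simp)
      by_cases hc : pvInFree w h b (x + d.1, y + d.2) ∧ (x + d.1, y + d.2) ∉ V
      · have hc1 := hc.1
        unfold pvInFree at hc1
        have hstep : pvBfsStep w h b x y (V, Q) d
            = ((x + d.1, y + d.2) :: V, Q ++ [(x + d.1, y + d.2)]) := by
          simp only [pvBfsStep]
          rw [if_pos ⟨hc1.1, hc1.2.1, hc1.2.2.1, hc1.2.2.2.1, hc1.2.2.2.2, hc.2⟩]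
        rw [hstep] at hst
        have hnxtV : ((x + d.1, y + d.2) :: V).Nodup := List.nodup_cons.2 ⟨hc.2, hV⟩
        have hnxtgood : ∀ c ∈ (x + d.1, y + d.2) :: V,
            pvInFree w h b c ∧ pvReach w h b s c := by
          intro c hcc
          rcases List.mem_cons.1 hcc with rfl | hcc
          · exact ⟨hc.1, Relation.ReflTransGen.tail hr ⟨hc.1, hadj⟩⟩
          · exact hgood c hcc
        obtain ⟨h1, h2, h3, h4, h5, h6⟩ :=
          ih ((x + d.1, y + d.2) :: V) (Q ++ [(x + d.1, y + d.2)]) st hst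
            (fun d' hd' => hds d' (by simp [hd'])) hnxtV hnxtgood
        have hnxtst : (x + d.1, y + d.2) ∈ st.1 := h2 _ (by simp)
        refine ⟨h1, fun c hcc => h2 c (by simp [hcc]), h3, ?_, ?_, ?_⟩
        · intro c
          rw [h4 c]
          constructor
          · rintro (hq | ⟨hs1, hs2⟩)
            · rcases List.mem_append.1 hq with hq | hq
              · exact Or.inl hq
              · rw [List.mem_singleton] at hq; subst hq
                exact Or.inr ⟨hnxtst, hc.2⟩
            · exact Or.inr ⟨hs1, fun hv => hs2 (by simp [hv])⟩
          · rintro (hq | ⟨hs1, hs2⟩)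
            · exact Or.inl (List.mem_append.2 (Or.inl hq))
            · by_cases hcn : c = (x + d.1, y + d.2)
              · exact Or.inl (List.mem_append.2 (Or.inr (by simp [hcn])))
              · exact Or.inr ⟨hs1, by simp [List.mem_cons, hcn, hs2]⟩
        · have h5' := h5
          simp only [List.length_append, List.length_cons, List.length_nil] at h5'
          omega
        · intro d' hd'
          rcases List.mem_cons.1 hd' with rfl | hd'
          · exact fun _ => hnxtst
          · exact h6 d' hd'
      · have hstep : pvBfsStep w h b x y (V, Q) d = (V, Q) := by
          simp only [pvBfsStep]
          rw [if_neg]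
          intro hcc
          exact hc ⟨⟨hcc.1, hcc.2.1, hcc.2.2.1, hcc.2.2.2.1, hcc.2.2.2.2.1⟩,
            hcc.2.2.2.2.2⟩
        rw [hstep] at hst
        obtain ⟨h1, h2, h3, h4, h5, h6⟩ :=
          ih V Q st hst (fun d' hd' => hds d' (by simp [hd'])) hV hgood
        refine ⟨h1, h2, h3, h4, h5, ?_⟩
        intro d' hd'
        rcases List.mem_cons.1 hd' with rfl | hd'
        · intro hfree
          have hin : (x + d'.1, y + d'.2) ∈ V := by
            by_contra hnot
            exact hc ⟨hfree, hnot⟩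
          exact h2 _ hin
        · exact h6 d' hd'

lemma pvBfsLoop_spec (w h : Int) (b : List (Int × Int)) (s : Int × Int)
    (hs : pvInFree w h b s) :
    ∀ (fuel : Nat) (V Q : List (Int × Int)), pvBfsInv w h b s V Q →
      (pvFree w h b).length - V.length + Q.length < fuel →
      (pvBfsLoop w h b fuel V Q).Nodup ∧
      (∀ c, c ∈ pvBfsLoop w h b fuel V Q ↔ pvReach w h b s c) := by
  intro fuel
  induction fuel with
  | zero => intro V Q _ hf; omega
  | succ f ih =>
      intro V Q hinv hf
      obtain ⟨hnd, hsV, hgood, hQV, hclosed⟩ := hinv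
      rcases Q with _ | ⟨⟨x, y⟩, qs⟩
      · simp only [pvBfsLoop]
        refine ⟨hnd, fun c => ⟨fun hc => (hgood c hc).2, fun hr => ?_⟩⟩
        induction hr with
        | refl => exact hsV
        | tail _ h2 ih2 => exact hclosed _ ih2 (by simp) _ h2.1 h2.2
      · simp only [pvBfsLoop]
        have hxyV : (x, y) ∈ V := hQV _ (by simp)
        have hr : pvReach w h b s (x, y) := (hgood _ hxyV).2
        have hds : ∀ d ∈ [((0 : Int), (1 : Int)), (0, -1), (-1, 0), (1, 0)],
            pvAdj (x, y) (x + d.1, y + d.2) := by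
          intro d hd
          simp only [List.mem_cons, List.not_mem_nil, or_false] at hd
          rcases hd with rfl | rfl | rfl | rfl <;>
            (simp [pvAdj, Prod.ext_iff] <;> omega)
        obtain ⟨h1, h2, h3, h4, h5, h6⟩ :=
          pvBfs_fold w h b s x y hr _ V qs _ rfl hds hnd hgood
        set st := List.foldl (pvBfsStep w h b x y) (V, qs)
          [((0 : Int), (1 : Int)), (0, -1), (-1, 0), (1, 0)] with hstdef
        have hcover : ∀ n, pvInFree w h b n → pvAdj (x, y) n → n ∈ st.1 := by
          intro n hnf hadj
          rcases hadj with rfl | rfl | rfl | rfl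
          · have e : (x + ((0 : Int), (1 : Int)).1, y + ((0 : Int), (1 : Int)).2)
                = ((x, y).1, (x, y).2 + 1) := by
              simp [Prod.ext_iff] <;> omega
            have hnf' : pvInFree w h b
                (x + ((0 : Int), (1 : Int)).1, y + ((0 : Int), (1 : Int)).2) := by
              rw [e]; exact hnf
            have hm := h6 (0, 1) (by simp) hnf'
            rwa [e] at hm
          · have e : (x + ((0 : Int), (-1 : Int)).1, y + ((0 : Int), (-1 : Int)).2)
                = ((x, y).1, (x, y).2 - 1) := by
              simp [Prod.ext_iff] <;> omega
            have hnf' : pvInFree w h b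
                (x + ((0 : Int), (-1 : Int)).1, y + ((0 : Int), (-1 : Int)).2) := by
              rw [e]; exact hnf
            have hm := h6 (0, -1) (by simp) hnf'
            rwa [e] at hm
          · have e : (x + ((-1 : Int), (0 : Int)).1, y + ((-1 : Int), (0 : Int)).2)
                = ((x, y).1 - 1, (x, y).2) := by
              simp [Prod.ext_iff] <;> omega
            have hnf' : pvInFree w h b
                (x + ((-1 : Int), (0 : Int)).1, y + ((-1 : Int), (0 : Int)).2) := by
              rw [e]; exact hnf
            have hm := h6 (-1, 0) (by simp) hnf'
            rwa [e] at hm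
          · have e : (x + ((1 : Int), (0 : Int)).1, y + ((1 : Int), (0 : Int)).2)
                = ((x, y).1 + 1, (x, y).2) := by
              simp [Prod.ext_iff] <;> omega
            have hnf' : pvInFree w h b
                (x + ((1 : Int), (0 : Int)).1, y + ((1 : Int), (0 : Int)).2) := by
              rw [e]; exact hnf
            have hm := h6 (1, 0) (by simp) hnf'
            rwa [e] at hm
        apply ih st.1 st.2
        · refine ⟨h1, h2 _ hsV, h3, ?_, ?_⟩
          · intro c hc
            rcases (h4 c).1 hc with hc' | ⟨hc', _⟩
            · exact h2 _ (hQV _ (by simp [hc']))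
            · exact hc'
          · intro v hv hvq n hnf hadj
            have hvnotq : v ∉ qs ∧ v ∈ V := by
              constructor
              · intro hvqs; exact hvq ((h4 v).2 (Or.inl hvqs))
              · by_contra hnV
                exact hvq ((h4 v).2 (Or.inr ⟨hv, hnV⟩))
            by_cases hvxy : v = (x, y)
            · subst hvxy
              exact hcover n hnf hadj
            · exact h2 _ (hclosed v hvnotq.2
                (by simp [hvxy, hvnotq.1]) n hnf hadj)
        · have hVle : V.length ≤ st.1.length := pv_nodup_subset_length hnd h2
          have hstle : st.1.length ≤ (pvFree w h b).length :=
            pv_nodup_subset_length h1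
              (fun c hc => mem_pvFree.2 (h3 c hc).1)
          simp only [List.length_cons] at hf
          omega

-- what one sweep of B's for-loop does
lemma pvPass_fold (w h : Int) (b : List (Int × Int)) (s : Int × Int) :
    ∀ (rest R rem0 : List (Int × Int)) (ch0 : Bool)
      (st : List (Int × Int) × List (Int × Int) × Bool),
      st = rest.foldl pvPassStep (R, rem0, ch0) →
      R.Nodup → rest.Nodup → rem0.Nodup →
      (∀ c ∈ rest, c ∉ R) → (∀ c ∈ rem0, c ∉ R ∧ c ∉ rest) →
      (∀ c ∈ R, pvReach w h b s c) → (∀ c ∈ rest, pvInFree w h b c) →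
      st.1.Nodup ∧ st.2.1.Nodup ∧
      (∀ c ∈ R, c ∈ st.1) ∧ (∀ c ∈ st.1, c ∈ R ∨ c ∈ rest) ∧
      (∀ c, c ∈ st.2.1 ↔ (c ∈ rem0 ∨ (c ∈ rest ∧ c ∉ st.1))) ∧
      (∀ c ∈ st.1, pvReach w h b s c) ∧
      (st.1.length + st.2.1.length = R.length + rem0.length + rest.length) ∧
      (ch0 = true → st.2.2 = true) ∧
      (st.2.2 = false → st.1 = R ∧ st.2.1 = rem0 ++ rest) ∧
      (st.2.2 = false → ∀ c ∈ rest,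
        ¬((c.1 + 1, c.2) ∈ R ∨ (c.1 - 1, c.2) ∈ R ∨
          (c.1, c.2 + 1) ∈ R ∨ (c.1, c.2 - 1) ∈ R)) ∧
      (ch0 = false → st.2.2 = true → R.length < st.1.length) := by
  intro rest
  induction rest with
  | nil =>
      intro R rem0 ch0 st hst hR _ hrem0 _ hrem0R hRreach _
      rw [List.foldl_nil] at hst
      subst hst
      refine ⟨hR, hrem0, fun c hc => hc, fun c hc => Or.inl hc, ?_, hRreach,
        by simp, fun hc => hc, fun _ => ⟨rfl, by simp⟩, by simp, ?_⟩
      · intro c; simp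
      · intro h1 h2
        rw [h1] at h2
        simp at h2
  | cons a rest ih =>
      intro R rem0 ch0 st hst hR hrest hrem0 hrestR hrem0R hRreach hrestfree
      rw [List.foldl_cons] at hst
      have hcR : a ∉ R := hrestR a (by simp)
      have hcrest : a ∉ rest := (List.nodup_cons.1 hrest).1
      by_cases hcond : (a.1 + 1, a.2) ∈ R ∨ (a.1 - 1, a.2) ∈ R ∨
          (a.1, a.2 + 1) ∈ R ∨ (a.1, a.2 - 1) ∈ R
      · have hstep : pvPassStep (R, rem0, ch0) a = (a :: R, rem0, true) := by
          simp only [pvPassStep]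
          rw [if_pos hcond]
        rw [hstep] at hst
        have hcreach : pvReach w h b s a := by
          have hcf : pvInFree w h b a := hrestfree a (by simp)
          rcases hcond with hn | hn | hn | hn
          · exact Relation.ReflTransGen.tail (hRreach _ hn)
              ⟨hcf, by simp [pvAdj, Prod.ext_iff] <;> omega⟩
          · exact Relation.ReflTransGen.tail (hRreach _ hn)
              ⟨hcf, by simp [pvAdj, Prod.ext_iff] <;> omega⟩
          · exact Relation.ReflTransGen.tail (hRreach _ hn)
              ⟨hcf, by simp [pvAdj, Prod.ext_iff] <;> omega⟩
          · exact Relation.ReflTransGen.tail (hRreach _ hn)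
              ⟨hcf, by simp [pvAdj, Prod.ext_iff] <;> omega⟩
        obtain ⟨h1, h2, h3, h4, h5, h6, h7, h8, h9, h10, h11⟩ :=
          ih (a :: R) rem0 true st hst (List.nodup_cons.2 ⟨hcR, hR⟩)
            hrest.of_cons hrem0
            (fun x hx => by
              simp only [List.mem_cons, not_or]
              exact ⟨fun hxc => hcrest (hxc ▸ hx), hrestR x (by simp [hx])⟩)
            (fun x hx => ⟨fun hxm => by
                rcases List.mem_cons.1 hxm with rfl | hxm
                · exact (hrem0R x hx).2 (by simp)
                · exact (hrem0R x hx).1 hxm,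
              fun hxm => (hrem0R x hx).2 (by simp [hxm])⟩)
            (fun x hx => by
              rcases List.mem_cons.1 hx with rfl | hx
              · exact hcreach
              · exact hRreach x hx)
            (fun x hx => hrestfree x (by simp [hx]))
        have hcst : a ∈ st.1 := h3 _ (by simp)
        have hch : st.2.2 = true := h8 rfl
        refine ⟨h1, h2, fun x hx => h3 x (by simp [hx]), ?_, ?_, h6, ?_,
          fun _ => hch, ?_, ?_, ?_⟩
        · intro x hx
          rcases h4 x hx with hx' | hx'
          · rcases List.mem_cons.1 hx' with rfl | hx'
            · exact Or.inr (by simp)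
            · exact Or.inl hx'
          · exact Or.inr (by simp [hx'])
        · intro z
          rw [h5 z]
          by_cases hza : z = a
          · subst hza
            have ha0 : z ∉ rem0 := fun hz => (hrem0R z hz).2 (by simp)
            simp [hcst, ha0]
          · simp only [List.mem_cons, hza, false_or]
        · simp only [List.length_cons] at h7 ⊢; omega
        · rw [hch]; simp
        · rw [hch]; simp
        · intro _ _
          have hle : (a :: R).length ≤ st.1.length :=
            pv_nodup_subset_length (List.nodup_cons.2 ⟨hcR, hR⟩) h3
          simp only [List.length_cons] at hle
          omega
      · have hstep : pvPassStep (R, rem0, ch0) a = (R, rem0 ++ [a], ch0) := by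
          simp only [pvPassStep]
          rw [if_neg hcond]
        rw [hstep] at hst
        obtain ⟨h1, h2, h3, h4, h5, h6, h7, h8, h9, h10, h11⟩ :=
          ih R (rem0 ++ [a]) ch0 st hst hR hrest.of_cons
            (by
              rw [List.nodup_append]
              refine ⟨hrem0, List.nodup_singleton a, ?_⟩
              intro x hx x' hx' heq
              subst heq
              rw [List.mem_singleton] at hx'
              exact (hrem0R x hx).2 (by simp [hx']))
            (fun x hx => hrestR x (by simp [hx]))
            (fun x hx => by
              rcases List.mem_append.1 hx with hx | hx
              · exact ⟨(hrem0R x hx).1, fun hc' => (hrem0R x hx).2 (by simp [hc'])⟩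
              · rw [List.mem_singleton] at hx; subst hx
                exact ⟨hcR, hcrest⟩)
            hRreach
            (fun x hx => hrestfree x (by simp [hx]))
        have hcnotst : a ∉ st.1 := by
          intro hcst
          rcases h4 a hcst with hc' | hc'
          · exact hcR hc'
          · exact hcrest hc'
        refine ⟨h1, h2, h3, ?_, ?_, h6, ?_, h8, ?_, ?_, h11⟩
        · intro x hx
          rcases h4 x hx with hx' | hx'
          · exact Or.inl hx'
          · exact Or.inr (by simp [hx'])
        · intro z
          rw [h5 z]
          by_cases hza : z = a
          · subst hza
            have ha0 : z ∉ rem0 := fun hz => (hrem0R z hz).2 (by simp)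
            simp [hcnotst, hcrest, ha0]
          · constructor
            · rintro (hq | ⟨hz1, hz2⟩)
              · rcases List.mem_append.1 hq with hq | hq
                · exact Or.inl hq
                · rw [List.mem_singleton] at hq; exact absurd hq hza
              · exact Or.inr ⟨by simp [hz1], hz2⟩
            · rintro (hq | ⟨hz1, hz2⟩)
              · exact Or.inl (List.mem_append.2 (Or.inl hq))
              · rcases List.mem_cons.1 hz1 with rfl | hz1
                · exact absurd rfl hza
                · exact Or.inr ⟨hz1, hz2⟩
        · simp only [List.length_append, List.length_cons, List.length_nil] at h7 ⊢
          omega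
        · intro hch
          obtain ⟨hA, hB⟩ := h9 hch
          exact ⟨hA, by rw [hB, List.append_assoc, List.singleton_append]⟩
        · intro hch x hx
          rcases List.mem_cons.1 hx with rfl | hx
          · exact hcond
          · exact h10 hch x hx

lemma pvGrow_spec (w h : Int) (b : List (Int × Int)) (s : Int × Int) :
    ∀ (fuel : Nat) (R rest : List (Int × Int)),
      R.Nodup → rest.Nodup → (∀ c ∈ rest, c ∉ R) → s ∈ R →
      (∀ c ∈ R, pvReach w h b s c) →
      (∀ c, c ∈ pvFree w h b ↔ (c ∈ R ∨ c ∈ rest)) →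
      rest.length < fuel →
      ∀ c, c ∈ (pvGrow fuel R rest).2 ↔
        (c ∈ pvFree w h b ∧ ¬ pvReach w h b s c) := by
  intro fuel
  induction fuel with
  | zero => intro R rest _ _ _ _ _ _ hf; omega
  | succ f ih =>
      intro R rest hR hrest hdisj hsR hreach hfree hf
      obtain ⟨h1, h2, h3, h4, h5, h6, h7, _, h9, h10, h11⟩ :=
        pvPass_fold w h b s rest R [] false (pvPass R rest) rfl hR hrest
          List.nodup_nil hdisj (by simp) hreach
          (fun c hc => mem_pvFree.1 ((hfree c).2 (Or.inr hc)))
      simp only [pvGrow]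
      by_cases hch : (pvPass R rest).2.2 = true
      · rw [if_pos hch]
        apply ih
        · exact h1
        · exact h2
        · intro c hc
          rcases (h5 c).1 hc with hc' | ⟨_, hc'⟩
          · simp at hc'
          · exact hc'
        · exact h3 _ hsR
        · exact h6
        · intro c
          rw [hfree c]
          constructor
          · rintro (hc | hc)
            · exact Or.inl (h3 _ hc)
            · by_cases hcs : c ∈ (pvPass R rest).1
              · exact Or.inl hcs
              · exact Or.inr ((h5 c).2 (Or.inr ⟨hc, hcs⟩))
          · rintro (hc | hc)
            · exact h4 _ hc
            · rcases (h5 c).1 hc with hc' | ⟨hc', _⟩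
              · simp at hc'
              · exact Or.inr hc'
        · have hstrict := h11 rfl hch
          simp only [List.length_nil, List.length_cons] at h7
          omega
      · rw [if_neg hch]
        rw [Bool.not_eq_true] at hch
        obtain ⟨hRid, hremid⟩ := h9 hch
        simp only [List.nil_append] at hremid
        have hclosed : ∀ v ∈ R, ∀ n, pvInFree w h b n → pvAdj v n → n ∈ R := by
          intro v hv n hnf hadj
          rcases (hfree n).1 (mem_pvFree.2 hnf) with hn | hn
          · exact hn
          · exfalso
            apply h10 hch n hn
            have hadj' := pvAdj_symm hadj
            rcases hadj' with hv' | hv' | hv' | hv'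
            · right; right; left
              have e : (n.1, n.2 + 1) = v := hv'.symm
              rw [e]; exact hv
            · right; right; right
              have e : (n.1, n.2 - 1) = v := hv'.symm
              rw [e]; exact hv
            · right; left
              have e : (n.1 - 1, n.2) = v := hv'.symm
              rw [e]; exact hv
            · left
              have e : (n.1 + 1, n.2) = v := hv'.symm
              rw [e]; exact hv
        have hreachR : ∀ c, pvReach w h b s c → c ∈ R := by
          intro c hrc
          induction hrc with
          | refl => exact hsR
          | tail _ h2' ih2 => exact hclosed _ ih2 _ h2'.1 h2'.2
        intro c
        dsimp only
        rw [hremid]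
        constructor
        · intro hc
          refine ⟨(hfree c).2 (Or.inr hc), fun hrc => hdisj c hc (hreachR c hrc)⟩
        · rintro ⟨hcf, hnr⟩
          rcases (hfree c).1 hcf with hc | hc
          · exact absurd (hreach c hc) hnr
          · exact hc

-- ===== VERDICT (by name: the statement is the Claim_ definition above) =====
theorem is_connected_py_spec : Claim_equal_is_connected_py := by
  intro w h b _
  unfold Spec_is_connected_py is_connected_py is_connected_py_alt
  rcases hfree : pvFree w h b with _ | ⟨s, rest⟩
  · rfl
  · dsimp only
    have hsfree : s ∈ pvFree w h b := by rw [hfree]; simp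
    have hs : pvInFree w h b s := mem_pvFree.1 hsfree
    have hnodup : (s :: rest).Nodup := hfree ▸ nodup_pvFree w h b
    have hsrest : s ∉ rest := (List.nodup_cons.1 hnodup).1
    have hrestnd : rest.Nodup := hnodup.of_cons
    have hlen : (pvFree w h b).length = rest.length + 1 := by
      rw [hfree]; simp
    have hInv : pvBfsInv w h b s [s] [s] := by
      refine ⟨List.nodup_singleton s, by simp, ?_, by simp, ?_⟩
      · intro c hc
        rw [List.mem_singleton] at hc; subst hc
        exact ⟨hs, Relation.ReflTransGen.refl⟩
      · intro v hv hvq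
        rw [List.mem_singleton] at hv
        exact absurd (by simp [hv]) hvq
    obtain ⟨hVnd, hViff⟩ :=
      pvBfsLoop_spec w h b s hs ((s :: rest).length + 1) [s] [s] hInv
        (by simp only [hlen, List.length_cons, List.length_nil]; omega)
    have hGiff := pvGrow_spec w h b s (rest.length + 1) [s] rest
      (List.nodup_singleton s) hrestnd
      (fun c hc => by
        rw [List.mem_singleton]
        rintro rfl; exact hsrest hc)
      (List.mem_singleton_self s)
      (fun c hc => by
        rw [List.mem_singleton] at hc; subst hc
        exact Relation.ReflTransGen.refl)
      (fun c => by rw [hfree]; simp)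
      (by omega)
    set V := pvBfsLoop w h b ((s :: rest).length + 1) [s] [s] with hVdef
    set G := pvGrow (rest.length + 1) [s] rest with hGdef
    rw [show ∀ (a b' : Bool), a = b' ↔ ((a = true) ↔ (b' = true)) from by decide]
    rw [beq_iff_eq, List.isEmpty_iff]
    have hVsub : ∀ c ∈ V, c ∈ pvFree w h b := by
      intro c hc
      exact mem_pvFree.2 (pvReach_inFree hs ((hViff c).1 hc))
    constructor
    · intro hVlen
      have hVlen' : V.length = (pvFree w h b).length := by
        rw [hlen]; simpa using hVlen
      have hVfin : V.toFinset = (pvFree w h b).toFinset := by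
        apply Finset.eq_of_subset_of_card_le
        · intro a ha
          rw [List.mem_toFinset] at *
          exact hVsub a ha
        · rw [List.toFinset_card_of_nodup (nodup_pvFree w h b),
            List.toFinset_card_of_nodup hVnd, hVlen']
      rw [List.eq_nil_iff_forall_not_mem]
      intro c hc
      obtain ⟨hcf, hnr⟩ := (hGiff c).1 hc
      apply hnr
      apply (hViff c).1
      have hcv : c ∈ V.toFinset := by rw [hVfin, List.mem_toFinset]; exact hcf
      rwa [List.mem_toFinset] at hcv
    · intro hGnil
      have hallreach : ∀ c ∈ pvFree w h b, pvReach w h b s c := by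
        intro c hc
        by_contra hnr
        have hcg : c ∈ G.2 := (hGiff c).2 ⟨hc, hnr⟩
        rw [hGnil] at hcg
        simp at hcg
      have hsub2 : ∀ c ∈ pvFree w h b, c ∈ V := by
        intro c hc
        exact (hViff c).2 (hallreach c hc)
      have hle1 : V.length ≤ (pvFree w h b).length :=
        pv_nodup_subset_length hVnd hVsub
      have hle2 : (pvFree w h b).length ≤ V.length :=
        pv_nodup_subset_length (nodup_pvFree w h b) hsub2
      simp only [List.length_cons]
      omega
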